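-- pv_equiv track=rewrite | github.com/ereal21/traso | bot/utils/level.py | get_level_info
-- ===== SOURCE A (Python) =====
-- LEVEL_THRESHOLDS = [0, 1, 5, 15, 30, 50]
--
-- LEVEL_NAMES = {
--     'lt': [
--         '😶‍🌫️ Niekšas',
--         '👏 Fanas',
--         '🎛️ Prodiuseris',
--         '🛹 Mobo narys',
--         '🧠 Mobo lyderis',
--         '🎤 Reperis',
--     ],
--     'en': [
--         '😶‍🌫️ Scoundrel',
--         '👏 Fan',
--         '🎛️ Producer',
--         '🛹 Crew member',
--         '🧠 Crew leader',
--         '🎤 Rapper',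
--     ],
--     'ru': [
--         '😶‍🌫️ Негодяй',
--         '👏 Фанат',
--         '🎛️ Продюсер',
--         '🛹 Участник банды',
--         '🧠 Лидер банды',
--         '🎤 Рэпер',
--     ],
-- }
--
-- def get_level_info(purchases: int, lang: str = 'lt'):
--     """Return level name and progress battery for purchase count.
--
--     Discount levels have been disabled, so this function always returns 0 as the
--     discount value to maintain compatibility with callers expecting three
--     return values.
--     """
--     if purchases < 0:
--         purchases = 0
--     level_index = 0
--     for idx, threshold in enumerate(LEVEL_THRESHOLDS):
--         if purchases >= threshold:
--             level_index = idx
--         else: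
--             break
--     names = LEVEL_NAMES.get(lang, LEVEL_NAMES['lt'])
--     level_name = names[level_index]
--     discount = 0
--
--     if level_index < len(LEVEL_THRESHOLDS) - 1:
--         next_threshold = LEVEL_THRESHOLDS[level_index + 1]
--         progress = purchases - LEVEL_THRESHOLDS[level_index]
--         needed = next_threshold - LEVEL_THRESHOLDS[level_index]
--         battery = '🪫' if progress * 2 < needed else '🔋'
--     else:
--         battery = '🔋'
--     return level_name, discount, battery
-- ===== SOURCE B (Python) =====
-- LEVEL_THRESHOLDS = [0, 1, 5, 15, 30, 50]
--
-- LEVEL_NAMES = {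
--     'lt': [
--         '\U0001F636\u200D\U0001F32B\uFE0F Niek\u0161as',
--         '\U0001F44F Fanas',
--         '\U0001F39B\uFE0F Prodiuseris',
--         '\U0001F6F9 Mobo narys',
--         '\U0001F9E0 Mobo lyderis',
--         '\U0001F3A4 Reperis',
--     ],
--     'en': [
--         '\U0001F636\u200D\U0001F32B\uFE0F Scoundrel',
--         '\U0001F44F Fan',
--         '\U0001F39B\uFE0F Producer',
--         '\U0001F6F9 Crew member',
--         '\U0001F9E0 Crew leader',
--         '\U0001F3A4 Rapper',
--     ],
--     'ru': [
--         '\U0001F636\u200D\U0001F32B\uFE0F \u041D\u0435\u0433\u043E\u0434\u044F\u0439',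
--         '\U0001F44F \u0424\u0430\u043D\u0430\u0442',
--         '\U0001F39B\uFE0F \u041F\u0440\u043E\u0434\u044E\u0441\u0435\u0440',
--         '\U0001F6F9 \u0423\u0447\u0430\u0441\u0442\u043D\u0438\u043A \u0431\u0430\u043D\u0434\u044B',
--         '\U0001F9E0 \u041B\u0438\u0434\u0435\u0440 \u0431\u0430\u043D\u0434\u044B',
--         '\U0001F3A4 \u0420\u044D\u043F\u0435\u0440',
--     ],
-- }
--
--
-- def _bisect_right(xs, x):
--     """Index of the first element > x in the sorted list xs (binary search)."""
--     lo, hi = 0, len(xs)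
--     while lo < hi:
--         mid = (lo + hi) // 2
--         if x < xs[mid]:
--             hi = mid
--         else:
--             lo = mid + 1
--     return lo
--
--
-- def get_level_info(purchases: int, lang: str = 'lt'):
--     p = max(purchases, 0)
--     # thresholds start at 0 and p >= 0, so i >= 0
--     i = _bisect_right(LEVEL_THRESHOLDS, p) - 1
--     names = LEVEL_NAMES.get(lang, LEVEL_NAMES['lt'])
--     if i + 1 == len(LEVEL_THRESHOLDS):
--         battery = '\U0001F50B'
--     else:
--         lo, hi = LEVEL_THRESHOLDS[i], LEVEL_THRESHOLDS[i + 1]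
--         battery = '\U0001FAAB' if 2 * (p - lo) < hi - lo else '\U0001F50B'
--     return names[i], 0, battery
-- ===== Notes on version B (the rewrite author's own statement) =====
-- stated objective: alternative
-- what changed: Replaces the forward linear scan with early break over thresholds by a hand-written binary search (bisect_right) over the sorted threshold table, with the clamp done via max and the last-level test done on the index instead of a separate else branch.
import Mathlib
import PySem

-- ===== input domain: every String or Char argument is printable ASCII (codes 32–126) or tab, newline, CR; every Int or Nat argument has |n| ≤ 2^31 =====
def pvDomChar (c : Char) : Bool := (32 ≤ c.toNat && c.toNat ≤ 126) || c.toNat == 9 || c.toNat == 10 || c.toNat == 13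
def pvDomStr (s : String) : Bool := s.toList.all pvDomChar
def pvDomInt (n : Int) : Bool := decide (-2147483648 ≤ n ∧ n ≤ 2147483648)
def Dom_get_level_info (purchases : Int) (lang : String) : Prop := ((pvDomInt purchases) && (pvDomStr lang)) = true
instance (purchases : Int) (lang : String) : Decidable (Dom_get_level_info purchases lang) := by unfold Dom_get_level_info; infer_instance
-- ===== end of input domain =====

-- B replaces A's linear scan with early break by a hand-written binary search over the sorted threshold table (alternative decomposition; return values identical).

-- ===== PORT A =====
def LEVEL_THRESHOLDS : List Int := [0, 1, 5, 15, 30, 50]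

def LEVEL_NAMES : PySem.Dict String (List String) := PySem.Dict.ofList [
  ("lt", ["😶‍🌫️ Niekšas", "👏 Fanas", "🎛️ Prodiuseris", "🛹 Mobo narys", "🧠 Mobo lyderis", "🎤 Reperis"]),
  ("en", ["😶‍🌫️ Scoundrel", "👏 Fan", "🎛️ Producer", "🛹 Crew member", "🧠 Crew leader", "🎤 Rapper"]),
  ("ru", ["😶‍🌫️ Негодяй", "👏 Фанат", "🎛️ Продюсер", "🛹 Участник банды", "🧠 Лидер банды", "🎤 Рэпер"])]

-- the for-loop over enumerate(LEVEL_THRESHOLDS) with `break`: stops at the first threshold above p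
def levelLoopA (p : Int) : List (Int × Int) → Int → Int
  | [], acc => acc
  | (idx, t) :: rest, acc => if p ≥ t then levelLoopA p rest idx else acc

def get_level_info (purchases : Int) (lang : String) : String × Int × String :=
  let p := if purchases < 0 then 0 else purchases
  let level_index := levelLoopA p (PySem.List.enumerate LEVEL_THRESHOLDS) 0
  let names := PySem.Dict.getD LEVEL_NAMES lang ((PySem.Dict.get? LEVEL_NAMES "lt").getD [])
  let level_name := PySem.List.pyGetD names level_index ""  -- always in range: level_index ∈ [0,5]
  let discount : Int := 0
  let battery :=
    if level_index < PySem.List.len LEVEL_THRESHOLDS - 1 then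
      let next_threshold := PySem.List.pyGetD LEVEL_THRESHOLDS (level_index + 1) 0
      let progress := p - PySem.List.pyGetD LEVEL_THRESHOLDS level_index 0
      let needed := next_threshold - PySem.List.pyGetD LEVEL_THRESHOLDS level_index 0
      if progress * 2 < needed then "🪫" else "🔋"
    else "🔋"
  (level_name, discount, battery)

-- ===== PORT B =====
-- hand-written bisect_right of Source B: while lo < hi: mid = (lo+hi)//2; … (lo,hi are nonneg, so Nat / equals Python //)
def bisectRightB (xs : List Int) (x : Int) (lo hi : Nat) : Nat :=
  if lo < hi then
    if x < xs.getD ((lo + hi) / 2) 0 then bisectRightB xs x lo ((lo + hi) / 2)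
    else bisectRightB xs x ((lo + hi) / 2 + 1) hi
  else lo
termination_by hi - lo
decreasing_by all_goals omega

def get_level_info_alt (purchases : Int) (lang : String) : String × Int × String :=
  let p := max purchases 0
  let i : Int := (bisectRightB LEVEL_THRESHOLDS p 0 LEVEL_THRESHOLDS.length : Int) - 1
  let names := PySem.Dict.getD LEVEL_NAMES lang ((PySem.Dict.get? LEVEL_NAMES "lt").getD [])
  let battery :=
    if i + 1 = PySem.List.len LEVEL_THRESHOLDS then "🔋"
    else
      let lo := PySem.List.pyGetD LEVEL_THRESHOLDS i 0
      let hi := PySem.List.pyGetD LEVEL_THRESHOLDS (i + 1) 0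
      if 2 * (p - lo) < hi - lo then "🪫" else "🔋"
  (PySem.List.pyGetD names i "", 0, battery)

-- ===== PRECONDITION & SPEC =====
def Spec_get_level_info (purchases : Int) (lang : String) (out : String × Int × String) : Prop := out = get_level_info_alt purchases lang
instance (purchases : Int) (lang : String) (out : String × Int × String) : Decidable (Spec_get_level_info purchases lang out) := by unfold Spec_get_level_info; infer_instance

-- ===== CLAIM (what is proved, stated in full; the proofs are below) =====
def Claim_equal_get_level_info : Prop := ∀ (purchases : Int) (lang : String), Dom_get_level_info purchases lang → Spec_get_level_info purchases lang (get_level_info purchases lang)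

-- ===== LEMMAS AND PROOFS =====

-- A and B agree at every input: case analysis over the threshold intervals.
theorem get_level_info_eq (purchases : Int) (lang : String) :
    get_level_info purchases lang = get_level_info_alt purchases lang := by
  unfold get_level_info get_level_info_alt
  by_cases h0 : purchases < 0
  · simp only [if_pos h0, show max purchases 0 = 0 by omega]
    simp [levelLoopA, bisectRightB, LEVEL_THRESHOLDS, PySem.List.enumerate,
      PySem.List.len, PySem.List.pyGetD_ofNat']
  · simp only [if_neg h0, show max purchases 0 = purchases by omega]
    by_cases h1 : purchases < 1
    · simp [levelLoopA, bisectRightB, LEVEL_THRESHOLDS, PySem.List.enumerate,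
        PySem.List.len, PySem.List.pyGetD_ofNat',
        show (0:Int) ≤ purchases by omega, show ¬ (1:Int) ≤ purchases by omega, h1, h0,
        show purchases < 15 by omega]
      split_ifs <;> first | rfl | omega
    · by_cases h2 : purchases < 5
      · simp [levelLoopA, bisectRightB, LEVEL_THRESHOLDS, PySem.List.enumerate,
          PySem.List.len, PySem.List.pyGetD_ofNat',
          show (0:Int) ≤ purchases by omega, show (1:Int) ≤ purchases by omega,
          show ¬ (5:Int) ≤ purchases by omega, show ¬ purchases < 1 by omega, h2,
          show purchases < 15 by omega]
        split_ifs <;> first | rfl | omega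
      · by_cases h3 : purchases < 15
        · simp [levelLoopA, bisectRightB, LEVEL_THRESHOLDS, PySem.List.enumerate,
            PySem.List.len, PySem.List.pyGetD_ofNat',
            show (0:Int) ≤ purchases by omega, show (1:Int) ≤ purchases by omega,
            show (5:Int) ≤ purchases by omega, show ¬ (15:Int) ≤ purchases by omega,
            show ¬ purchases < 5 by omega, h3, show ¬ purchases < 1 by omega]
          split_ifs <;> first | rfl | omega
        · by_cases h4 : purchases < 30
          · simp [levelLoopA, bisectRightB, LEVEL_THRESHOLDS, PySem.List.enumerate,
              PySem.List.len, PySem.List.pyGetD_ofNat',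
              show (0:Int) ≤ purchases by omega, show (1:Int) ≤ purchases by omega,
              show (5:Int) ≤ purchases by omega, show (15:Int) ≤ purchases by omega,
              show ¬ (30:Int) ≤ purchases by omega, show ¬ purchases < 15 by omega,
              h4, show purchases < 50 by omega]
            split_ifs <;> first | rfl | omega
          · by_cases h5 : purchases < 50
            · simp [levelLoopA, bisectRightB, LEVEL_THRESHOLDS, PySem.List.enumerate,
                PySem.List.len, PySem.List.pyGetD_ofNat',
                show (0:Int) ≤ purchases by omega, show (1:Int) ≤ purchases by omega,
                show (5:Int) ≤ purchases by omega, show (15:Int) ≤ purchases by omega,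
                show (30:Int) ≤ purchases by omega, show ¬ (50:Int) ≤ purchases by omega,
                show ¬ purchases < 30 by omega, h5, show ¬ purchases < 15 by omega]
              split_ifs <;> first | rfl | omega
            · simp [levelLoopA, bisectRightB, LEVEL_THRESHOLDS, PySem.List.enumerate,
                PySem.List.len, PySem.List.pyGetD_ofNat',
                show (0:Int) ≤ purchases by omega, show (1:Int) ≤ purchases by omega,
                show (5:Int) ≤ purchases by omega, show (15:Int) ≤ purchases by omega,
                show (30:Int) ≤ purchases by omega, show (50:Int) ≤ purchases by omega,
                show ¬ purchases < 50 by omega, show ¬ purchases < 15 by omega]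

-- ===== VERDICT (by name: the statement is the Claim_ definition above) =====
theorem get_level_info_spec : Claim_equal_get_level_info := by
  intro purchases lang _
  unfold Spec_get_level_info
  exact get_level_info_eq purchases lang
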